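-- pv_equiv track=rewrite | github.com/Thomas-Rowlands/GWAS-Miner | GWAS_Miner/NLP.py | get_hyphenated_variations
-- ===== SOURCE A (Python) =====
-- def get_hyphenated_variations(term: str):
--     output = []
--     # Remove hyphens.
--     if "-" in term:
--         output.append(term.replace("-", " "))
--     # Add each variation of hyphenations.
--     if " " in term:
--         location = term.find(" ")
--         for i in range(term.count(" ")):
--             hyphenated = term[:location] + "-" + term[location + 1:]
--             output.append(hyphenated)
--             location = term.find(" ", location + 1)
--             # no further spaces found.
--             if location == -1:
--                 break
--     return output
-- ===== SOURCE B (Python) =====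
-- def get_hyphenated_variations(term: str):
--     output = []
--     # Remove hyphens.
--     if "-" in term:
--         output.append(term.replace("-", " "))
--     # One variation per space: split into tokens once, then rebuild with '-' at each boundary.
--     parts = term.split(" ")
--     for j in range(len(parts) - 1):
--         output.append(" ".join(parts[:j + 1]) + "-" + " ".join(parts[j + 1:]))
--     return output
-- ===== Notes on version B (the rewrite author's own statement) =====
-- stated objective: alternative
-- what changed: A chases successive space positions with repeated term.find(' ', location+1) calls and slices the string at each found index; B splits the term into tokens once and rebuilds each variation by joining the tokens with a '-' at one boundary, so the find/location state machine disappears.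
import Mathlib
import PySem

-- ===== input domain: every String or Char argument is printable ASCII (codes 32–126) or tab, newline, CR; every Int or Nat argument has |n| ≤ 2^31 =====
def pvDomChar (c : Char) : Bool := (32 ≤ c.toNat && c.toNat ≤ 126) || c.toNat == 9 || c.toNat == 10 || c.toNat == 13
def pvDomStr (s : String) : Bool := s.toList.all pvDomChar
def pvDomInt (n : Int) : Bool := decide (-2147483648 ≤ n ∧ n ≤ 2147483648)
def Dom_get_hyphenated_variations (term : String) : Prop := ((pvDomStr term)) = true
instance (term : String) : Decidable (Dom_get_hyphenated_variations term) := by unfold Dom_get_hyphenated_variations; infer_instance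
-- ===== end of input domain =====

-- B replaces A's repeated term.find position-chasing by a single split-into-tokens pass,
-- rebuilding one variation per token boundary (objective: alternative decomposition, same cost).
-- Both ports work on term.toList via PySem.Chars (the PySem.Str.* string functions are thin
-- wrappers over exactly these List-Char definitions).

-- ===== PORT A =====
-- one iteration of A's 'for i in range(term.count(" "))' body; state = (output, location, broke)
def pvStepA (s : List Char) (st : List (List Char) × Int × Bool) (_ : Int) :
    List (List Char) × Int × Bool :=
  match st with
  | (out, loc, done) =>
    if done then (out, loc, done)
    else
      -- hyphenated = term[:location] + "-" + term[location + 1:]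
      let hyph := PySem.Chars.slice s none (some loc) ++ ['-'] ++
                  PySem.Chars.slice s (some (loc + 1)) none
      -- location = term.find(" ", location + 1); break if it is -1
      let loc' := PySem.Chars.findFrom s [' '] (loc + 1)
      (out ++ [hyph], loc', loc' == -1)

def charsA (s : List Char) : List (List Char) :=
  let output := if PySem.Chars.isIn ['-'] s then [PySem.Chars.replace s ['-'] [' ']] else []
  if PySem.Chars.isIn [' '] s then
    let location := PySem.Chars.find s [' ']
    ((PySem.List.pyRange 0 (PySem.Chars.count s [' ']) 1).foldl (pvStepA s)
      (output, location, false)).1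
  else output

def get_hyphenated_variations (term : String) : List String :=
  (charsA term.toList).map String.ofList

-- ===== PORT B =====
def charsB (s : List Char) : List (List Char) :=
  let output := if PySem.Chars.isIn ['-'] s then [PySem.Chars.replace s ['-'] [' ']] else []
  -- parts = term.split(" ")  (split? with the nonempty separator " " is some (splitOn))
  let parts := PySem.Chars.splitOn s [' ']
  -- for j in range(len(parts) - 1): output.append(" ".join(parts[:j+1]) + "-" + " ".join(parts[j+1:]))
  (PySem.List.pyRange 0 ((parts.length : Int) - 1) 1).foldl
    (fun out j =>
      out ++ [PySem.Chars.join [' '] (PySem.List.slice parts none (some (j + 1))) ++ ['-'] ++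
              PySem.Chars.join [' '] (PySem.List.slice parts (some (j + 1)) none)])
    output

def get_hyphenated_variations_alt (term : String) : List String :=
  (charsB term.toList).map String.ofList

-- ===== PRECONDITION & SPEC =====
def Spec_get_hyphenated_variations (term : String) (out : List String) : Prop := out = get_hyphenated_variations_alt term
instance (term : String) (out : List String) : Decidable (Spec_get_hyphenated_variations term out) := by unfold Spec_get_hyphenated_variations; infer_instance

-- ===== CLAIM (what is proved, stated in full; the proofs are below) =====
def Claim_equal_get_hyphenated_variations : Prop := ∀ (term : String), Dom_get_hyphenated_variations term → Spec_get_hyphenated_variations term (get_hyphenated_variations term)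

-- ===== LEMMAS AND PROOFS =====

-- common spec: one variation per space position, in order
def pvRep (s : List Char) (i : Nat) : List Char := s.take i ++ '-' :: s.drop (i + 1)

def pvSpaces : List Char → Nat → List Nat
  | [], _ => []
  | x :: t, k => (if x = ' ' then [k] else []) ++ pvSpaces t (k + 1)

def pvSplit : List Char → List (List Char)
  | [] => [[]]
  | x :: t => if x = ' ' then [] :: pvSplit t else (pvSplit t).modifyHead (x :: ·)

def pvVar : List Char → List (List Char)
  | [] => []
  | x :: t => (if x = ' ' then [('-' :: t)] else []) ++ (pvVar t).map (x :: ·)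

theorem pvSpaces_shift (l : List Char) : ∀ (k : Nat), pvSpaces l k = (pvSpaces l 0).map (· + k) := by
  induction l with
  | nil => intro k; simp [pvSpaces]
  | cons x t ih =>
    intro k
    simp only [pvSpaces, List.map_append]
    rw [ih (k + 1), ih 1]
    by_cases hx : x = ' ' <;> simp [hx, List.map_map] <;> (intros; omega)

theorem pvSpaces_length (l : List Char) (k : Nat) : (pvSpaces l k).length = l.count ' ' := by
  induction l generalizing k with
  | nil => simp [pvSpaces]
  | cons x t ih => by_cases hx : x = ' ' <;> simp [pvSpaces, hx, ih]

theorem pvSpaces_eq_nil_iff (l : List Char) (k : Nat) : pvSpaces l k = [] ↔ ' ' ∉ l := by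
  induction l generalizing k with
  | nil => simp [pvSpaces]
  | cons x t ih =>
    by_cases hx : x = ' '
    · simp [pvSpaces, hx]
    · simp [pvSpaces, hx, ih, eq_comm]

theorem pvSplit_ne_nil (l : List Char) : pvSplit l ≠ [] := by
  cases l with
  | nil => simp [pvSplit]
  | cons x t =>
    by_cases hx : x = ' ' <;> simp [pvSplit, hx]
    cases h : pvSplit t with
    | nil => exact absurd h (pvSplit_ne_nil t)
    | cons a r => simp

-- A-side: characterize find/count/findFrom for the one-character pattern " "
theorem find_go_space (l : List Char) : ∀ (k : Nat),
    PySem.Chars.find.go [' '] l k =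
      match pvSpaces l k with
      | [] => -1
      | i :: _ => (i : Int) := by
  induction l with
  | nil => intro k; simp [PySem.Chars.find.go, pvSpaces]
  | cons x t ih =>
    intro k
    by_cases hx : x = ' '
    · simp [PySem.Chars.find.go, List.isPrefixOf, hx, pvSpaces]
    · simp [PySem.Chars.find.go, List.isPrefixOf, hx, pvSpaces, ih (k + 1)]
      exact fun h => absurd h.symm hx

theorem find_space (s : List Char) :
    PySem.Chars.find s [' '] =
      match pvSpaces s 0 with
      | [] => -1
      | i :: _ => (i : Int) := by
  simp [PySem.Chars.find, find_go_space]

theorem count_go_space (l : List Char) : ∀ (fuel acc : Nat), l.length ≤ fuel →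
    PySem.Chars.count.go [' '] fuel l acc = acc + l.count ' ' := by
  induction l with
  | nil => intro fuel acc h; cases fuel <;> simp [PySem.Chars.count.go]
  | cons x t ih =>
    intro fuel acc h
    cases fuel with
    | zero => simp at h
    | succ f =>
      have h' : t.length ≤ f := by simp only [List.length_cons] at h; omega
      by_cases hx : x = ' '
      · simp [PySem.Chars.count.go, List.isPrefixOf, hx, ih f (acc + 1) h']
        omega
      · simp [PySem.Chars.count.go, List.isPrefixOf, hx, ih f acc h']
        exact fun hc => absurd hc.symm hx

theorem count_space (s : List Char) :
    PySem.Chars.count s [' '] = s.count ' ' := by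
  simp [PySem.Chars.count, count_go_space s s.length 0 le_rfl]

theorem findFrom_space (s : List Char) (k : Nat) (hk : k ≤ s.length) :
    PySem.Chars.findFrom s [' '] (k : Int) =
      match pvSpaces (s.drop k) k with
      | [] => -1
      | i :: _ => (i : Int) := by
  rw [PySem.Chars.findFrom_natCast s [' '] k hk]
  rw [show PySem.Chars.find (s.drop k) [' '] = PySem.Chars.find.go [' '] (s.drop k) 0 from rfl,
    find_go_space]
  rw [pvSpaces_shift (s.drop k) k]
  cases h : pvSpaces (s.drop k) 0 with
  | nil => simp
  | cons i r =>
    simp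
    ring

-- the head of the pending-spaces list: its position, bound, and the list after it
theorem pvSpaces_head (s : List Char) : ∀ (d k i : Nat) (r : List Nat),
    s.length - k ≤ d → k ≤ s.length → pvSpaces (s.drop k) k = i :: r →
    k ≤ i ∧ i < s.length ∧ pvSpaces (s.drop (i + 1)) (i + 1) = r := by
  intro d
  induction d with
  | zero =>
    intro k i r hd hk h
    have : s.drop k = [] := List.drop_eq_nil_of_le (by omega)
    rw [this] at h; simp [pvSpaces] at h
  | succ d ih =>
    intro k i r hd hk h
    rcases Nat.lt_or_ge k s.length with hlt | hge
    · rw [List.drop_eq_getElem_cons hlt] at h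
      by_cases hx : s[k] = ' '
      · simp [pvSpaces, hx] at h
        obtain ⟨rfl, hr⟩ := h
        exact ⟨le_rfl, hlt, hr⟩
      · simp [pvSpaces, hx] at h
        obtain ⟨h1, h2, h3⟩ := ih (k + 1) i r (by omega) (by omega) h
        exact ⟨by omega, h2, h3⟩
    · have : s.drop k = [] := List.drop_eq_nil_of_le hge
      rw [this] at h; simp [pvSpaces] at h

theorem foldl_stepA_done (s : List Char) (fuel : List Int) (out : List (List Char)) (loc : Int) :
    fuel.foldl (pvStepA s) (out, loc, true) = (out, loc, true) := by
  induction fuel with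
  | nil => rfl
  | cons f fuel ih => simpa [pvStepA] using ih

-- loop invariant: starting at the head of the pending-spaces list, the loop emits one
-- variation per pending space (fuel permitting)
theorem loopA_inv (s : List Char) : ∀ (r : List Nat) (k i : Nat) (acc : List (List Char))
    (fuel : List Int), k ≤ s.length → pvSpaces (s.drop k) k = i :: r →
    r.length + 1 ≤ fuel.length →
    (fuel.foldl (pvStepA s) (acc, (i : Int), false)).1 = acc ++ (i :: r).map (pvRep s) := by
  intro r
  induction r with
  | nil =>
    intro k i acc fuel hk h hf
    obtain ⟨hki, hilen, hnext⟩ := pvSpaces_head s (s.length - k) k i [] le_rfl hk h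
    cases fuel with
    | nil => simp at hf
    | cons f fuel =>
      simp only [List.foldl_cons, pvStepA]
      rw [if_neg (by simp)]
      have h1 : PySem.Chars.slice s none (some (i : Int)) = s.take i := by
        rw [PySem.Chars.slice_eq_listSlice, PySem.List.slice_to s (by positivity)]; simp
      have h2 : PySem.Chars.slice s (some ((i : Int) + 1)) none = s.drop (i + 1) := by
        rw [PySem.Chars.slice_eq_listSlice,
          show ((i : Int) + 1) = ((i + 1 : Nat) : Int) by push_cast; ring,
          PySem.List.slice_from s (by positivity)]
        simp
      have h3 : PySem.Chars.findFrom s [' '] ((i : Int) + 1) = -1 := by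
        rw [show ((i : Int) + 1) = ((i + 1 : Nat) : Int) by push_cast; ring,
          findFrom_space s (i + 1) (by omega), hnext]
      simp only [h1, h2, h3]
      simp [foldl_stepA_done, pvRep]
  | cons i' r' ih =>
    intro k i acc fuel hk h hf
    obtain ⟨hki, hilen, hnext⟩ := pvSpaces_head s (s.length - k) k i (i' :: r') le_rfl hk h
    cases fuel with
    | nil => simp at hf
    | cons f fuel =>
      simp only [List.foldl_cons, pvStepA]
      rw [if_neg (by simp)]
      have h1 : PySem.Chars.slice s none (some (i : Int)) = s.take i := by
        rw [PySem.Chars.slice_eq_listSlice, PySem.List.slice_to s (by positivity)]; simp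
      have h2 : PySem.Chars.slice s (some ((i : Int) + 1)) none = s.drop (i + 1) := by
        rw [PySem.Chars.slice_eq_listSlice,
          show ((i : Int) + 1) = ((i + 1 : Nat) : Int) by push_cast; ring,
          PySem.List.slice_from s (by positivity)]
        simp
      have h3 : PySem.Chars.findFrom s [' '] ((i : Int) + 1) = (i' : Int) := by
        rw [show ((i : Int) + 1) = ((i + 1 : Nat) : Int) by push_cast; ring,
          findFrom_space s (i + 1) (by omega), hnext]
      have h4 : ((i' : Int) == -1) = false := by simp
      simp only [h1, h2, h3, h4]
      rw [ih (i + 1) i' (acc ++ [s.take i ++ ['-'] ++ s.drop (i + 1)]) fuel (by omega) hnext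
        (by simpa using hf)]
      simp [pvRep]

theorem pyRange_len (n : Nat) : (PySem.List.pyRange 0 (n : Int) 1).length = n := by
  rw [PySem.List.pyRange_of_pos 0 n (by norm_num)]
  cases n with
  | zero => simp
  | succ m => simp

theorem charsA_eq (s : List Char) :
    charsA s = (if PySem.Chars.isIn ['-'] s then [PySem.Chars.replace s ['-'] [' ']] else []) ++
      (pvSpaces s 0).map (pvRep s) := by
  have hmem : (PySem.Chars.isIn [' '] s = true) ↔ ' ' ∈ s := by
    rw [PySem.Chars.isIn_iff_infix, List.singleton_infix_iff]
  by_cases hsp : PySem.Chars.isIn [' '] s = true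
  · obtain ⟨i, r, h⟩ : ∃ i r, pvSpaces s 0 = i :: r := by
      cases h : pvSpaces s 0 with
      | nil => exact absurd ((pvSpaces_eq_nil_iff s 0).mp h) (by simpa using hmem.mp hsp)
      | cons i r => exact ⟨i, r, rfl⟩
    have hcnt : PySem.Chars.count s [' '] = r.length + 1 := by
      rw [count_space, ← pvSpaces_length s 0, h]; simp
    simp only [charsA, hsp, if_true, find_space, h, hcnt]
    rw [loopA_inv s r 0 i _ _ (by omega) (by simpa using h) (by rw [pyRange_len])]
  · have h0 : pvSpaces s 0 = [] := (pvSpaces_eq_nil_iff s 0).mpr (fun hm => hsp (hmem.mpr hm))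
    simp [charsA, hsp, h0]

theorem pvRep_cons (x : Char) (t : List Char) (i : Nat) : pvRep (x :: t) (i + 1) = x :: pvRep t i := rfl

theorem spaces_map_rep (s : List Char) : (pvSpaces s 0).map (pvRep s) = pvVar s := by
  induction s with
  | nil => rfl
  | cons x t ih =>
    have hmaps : ((pvSpaces t 0).map (· + 1)).map (pvRep (x :: t)) = (pvVar t).map (x :: ·) := by
      rw [List.map_map, ← ih, List.map_map]
      exact List.map_congr_left (fun i _ => pvRep_cons x t i)
    by_cases hx : x = ' '
    · subst hx
      simp only [pvSpaces, pvVar, if_true, List.map_append, pvSpaces_shift t 1, hmaps]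
      rfl
    · simp [pvSpaces, pvVar, hx, pvSpaces_shift t 1]
      rw [← List.map_map, hmaps]

theorem charsA_pvVar (s : List Char) :
    charsA s = (if PySem.Chars.isIn ['-'] s then [PySem.Chars.replace s ['-'] [' ']] else []) ++ pvVar s := by
  rw [charsA_eq, spaces_map_rep]

-- B-side: characterize split(" ") and " ".join
theorem splitOn_go_space (l : List Char) : ∀ (fuel : Nat) (cur : List Char)
    (acc : List (List Char)), l.length ≤ fuel →
    PySem.Chars.splitOn.go [' '] fuel l cur acc =
      acc.reverse ++ (pvSplit l).modifyHead (cur.reverse ++ ·) := by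
  induction l with
  | nil =>
    intro fuel cur acc _
    cases fuel <;> simp [PySem.Chars.splitOn.go, pvSplit]
  | cons x t ih =>
    intro fuel cur acc h
    cases fuel with
    | zero => simp at h
    | succ f =>
      have h' : t.length ≤ f := by simp only [List.length_cons] at h; omega
      by_cases hx : x = ' '
      · subst hx
        simp only [PySem.Chars.splitOn.go, List.isPrefixOf]
        rw [if_pos (by simp)]
        rw [show List.drop [' '].length (' ' :: t) = t by simp, ih f [] _ h']
        simp only [pvSplit]
        cases h2 : pvSplit t with
        | nil => exact absurd h2 (pvSplit_ne_nil t)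
        | cons a r => simp
      · simp only [PySem.Chars.splitOn.go, List.isPrefixOf]
        rw [if_neg (by simp only [Bool.and_true, beq_iff_eq]; exact fun hh => hx hh.symm)]
        rw [ih f (x :: cur) acc h']
        simp only [pvSplit]
        rw [if_neg hx, List.modifyHead_modifyHead]
        have hfg : (fun a : List Char => (x :: cur).reverse ++ a) =
            ((fun a : List Char => cur.reverse ++ a) ∘ fun a => x :: a) := by
          funext a; simp
        rw [hfg]

theorem splitOn_space (s : List Char) : PySem.Chars.splitOn s [' '] = pvSplit s := by
  simp only [PySem.Chars.splitOn]
  rw [splitOn_go_space s (s.length + 1) [] [] (by omega)]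
  cases h : pvSplit s with
  | nil => exact absurd h (pvSplit_ne_nil s)
  | cons a r => simp

theorem ic_single (a : List Char) : [' '].intercalate [a] = a := by
  simp [List.intercalate]

theorem ic_cons (a b : List Char) (r : List (List Char)) :
    [' '].intercalate (a :: b :: r) = a ++ ' ' :: [' '].intercalate (b :: r) := by
  simp [List.intercalate, List.intersperse]

theorem ic_modifyHead (x : Char) (h : List Char) (r : List (List Char)) :
    [' '].intercalate ((x :: h) :: r) = x :: [' '].intercalate (h :: r) := by
  cases r with
  | nil => simp [ic_single]
  | cons b r' => simp [ic_cons]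

theorem join_pvSplit (s : List Char) : [' '].intercalate (pvSplit s) = s := by
  induction s with
  | nil => simp [pvSplit, ic_single]
  | cons x t ih =>
    by_cases hx : x = ' '
    · subst hx
      cases h2 : pvSplit t with
      | nil => exact absurd h2 (pvSplit_ne_nil t)
      | cons a r =>
        rw [h2] at ih
        rw [show pvSplit (' ' :: t) = [] :: pvSplit t by simp [pvSplit], h2, ic_cons, ih]
        simp
    · cases h2 : pvSplit t with
      | nil => exact absurd h2 (pvSplit_ne_nil t)
      | cons hh rr =>
        rw [h2] at ih
        simp only [pvSplit, if_neg hx, h2, List.modifyHead_cons]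
        rw [ic_modifyHead, ih]

theorem pyRange_zero_natCast (n : Nat) :
    PySem.List.pyRange 0 (n : Int) 1 = (List.range n).map (fun k => (Int.ofNat k)) := by
  rw [PySem.List.pyRange_of_pos 0 n (by norm_num)]
  cases n with
  | zero => simp
  | succ m => simp

theorem B_map_eq_pvVar (s : List Char) :
    (List.range ((pvSplit s).length - 1)).map (fun j =>
      [' '].intercalate ((pvSplit s).take (j + 1)) ++ '-' ::
        [' '].intercalate ((pvSplit s).drop (j + 1))) = pvVar s := by
  induction s with
  | nil => simp [pvSplit, pvVar]
  | cons x t ih =>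
    obtain ⟨hh, rr, hP⟩ : ∃ hh rr, pvSplit t = hh :: rr := by
      cases h2 : pvSplit t with
      | nil => exact absurd h2 (pvSplit_ne_nil t)
      | cons a r => exact ⟨a, r, rfl⟩
    rw [hP] at ih
    simp only [List.length_cons, Nat.add_sub_cancel] at ih
    by_cases hx : x = ' '
    · subst hx
      have hic : [' '].intercalate (hh :: rr) = t := by rw [← hP, join_pvSplit]
      rw [show pvSplit (' ' :: t) = [] :: pvSplit t by simp [pvSplit], hP]
      simp only [List.length_cons, Nat.add_sub_cancel, List.range_succ_eq_map, List.map_cons,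
        List.map_map]
      rw [show pvVar (' ' :: t) = ('-' :: t) :: (pvVar t).map (' ' :: ·) by simp [pvVar]]
      congr 1
      · simp [ic_single, hic]
      · rw [← ih, List.map_map]
        refine List.map_congr_left (fun j _ => ?_)
        simp [Function.comp, List.take_succ_cons, List.drop_succ_cons, ic_cons]
    · have hgood : pvSplit (x :: t) = (x :: hh) :: rr := by simp [pvSplit, hx, hP]
      rw [hgood]
      simp only [List.length_cons, Nat.add_sub_cancel]
      rw [show pvVar (x :: t) = (pvVar t).map (x :: ·) by simp [pvVar, hx], ← ih, List.map_map]
      refine List.map_congr_left (fun j _ => ?_)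
      simp only [Function.comp, List.take_succ_cons, List.drop_succ_cons, ic_modifyHead]
      simp

theorem charsB_pvVar (s : List Char) :
    charsB s = (if PySem.Chars.isIn ['-'] s then [PySem.Chars.replace s ['-'] [' ']] else []) ++
      pvVar s := by
  simp only [charsB, splitOn_space, PySem.List.foldl_append_singleton_eq_map]
  congr 1
  obtain ⟨m, hm⟩ : ∃ m, (pvSplit s).length = m + 1 := by
    cases h2 : pvSplit s with
    | nil => exact absurd h2 (pvSplit_ne_nil s)
    | cons a r => exact ⟨r.length, by simp⟩
  rw [hm, show ((m + 1 : Nat) : Int) - 1 = ((m : Nat) : Int) by push_cast; ring,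
    pyRange_zero_natCast, ← B_map_eq_pvVar s, hm]
  simp only [Nat.add_sub_cancel, List.map_map]
  refine List.map_congr_left (fun j _ => ?_)
  simp only [Function.comp_apply]
  rw [show (Int.ofNat j + 1) = ((j + 1 : Nat) : Int) by push_cast; simp,
    PySem.List.slice_to _ (by positivity), PySem.List.slice_from _ (by positivity)]
  simp [PySem.Chars.join]

-- ===== VERDICT (by name: the statement is the Claim_ definition above) =====
theorem get_hyphenated_variations_spec : Claim_equal_get_hyphenated_variations := by
  intro term _
  unfold Spec_get_hyphenated_variations get_hyphenated_variations get_hyphenated_variations_alt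
  rw [charsA_pvVar, charsB_pvVar]
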